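-- pv_equiv track=rewrite | github.com/vibhorkashyap/python | oddSumPairs.py | has_unique_odd_sum_pairs
-- ===== SOURCE A (Python) =====
-- def is_odd_pair(a,b):
--     if (a+b)%2==0:
--         return False
--     else:
--         return True
--
-- def find_odd_pairs(A):
--     pairslist = []
--     for i in range(len(A)):
--         for j in range(len(A)):
--             if i==j:
--                 continue
--             if is_odd_pair(A[i],A[j]):
--                 pairslist.append((A[i],A[j]))
--     pairslist = [tuple(x) for x in set(map(frozenset, pairslist))]
--     return pairslist
--
-- def has_unique_odd_sum_pairs(A):
--     pairs = find_odd_pairs(A)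
--     for i in pairs:
--         paircheck = []
--         paircheck.append(i[0])
--         paircheck.append(i[1])
--         for j in pairs:
--             if i[0]==j[0] or i[0]==j[1] or i[1]==j[0] or i[1]==j[1]:
--                 continue
--             paircheck.append(j[0])
--             paircheck.append(j[1])
--         if set(paircheck) == set(A):
--             return True
--     return False
-- ===== SOURCE B (Python) =====
-- def has_unique_odd_sum_pairs(A):
--     evens = {x for x in A if x % 2 == 0}
--     odds = {x for x in A if x % 2 != 0}
--     e, o = len(evens), len(odds)
--     return (e == 1 and o == 1) or (e >= 2 and o >= 2)
-- ===== Notes on version B (the rewrite author's own statement) =====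
-- stated objective: faster
-- what changed: Replaced the O(n^2) pair enumeration plus O(m^2) cover scan with a single pass counting distinct even and odd values: the cover condition holds iff exactly one even and one odd distinct value, or at least two of each.
import Mathlib
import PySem

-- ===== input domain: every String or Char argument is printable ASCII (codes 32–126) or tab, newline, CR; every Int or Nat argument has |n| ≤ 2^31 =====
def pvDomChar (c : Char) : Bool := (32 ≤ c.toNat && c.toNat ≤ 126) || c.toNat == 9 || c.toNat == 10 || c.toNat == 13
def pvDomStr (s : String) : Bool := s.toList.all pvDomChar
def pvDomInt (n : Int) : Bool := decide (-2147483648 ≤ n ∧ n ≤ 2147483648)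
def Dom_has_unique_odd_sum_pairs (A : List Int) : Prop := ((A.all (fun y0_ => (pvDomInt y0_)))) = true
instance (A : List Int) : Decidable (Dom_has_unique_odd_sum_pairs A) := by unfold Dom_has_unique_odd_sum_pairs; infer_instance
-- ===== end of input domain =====

-- B replaces A's O(n^4) pair enumeration + cover scan by counting distinct even/odd values in one pass (faster, asymptotic).


-- ===== PORT A =====
def is_odd_pair (a b : Int) : Bool :=
  if PySem.Int.mod (a + b) 2 == 0 then false else true

-- frozenset({a,b}) with a ≠ b, represented as the ordered pair (min, max); exact as a 2-element set.
-- (CPython's tuple(frozenset) enumeration order is a hash accident, but the boolean result below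
-- is invariant under pair orientation and list order, so this representation is exact for it.)
def pvFrozen2 (p : Int × Int) : Int × Int :=
  if p.1 ≤ p.2 then p else (p.2, p.1)

def find_odd_pairs (A : List Int) : List (Int × Int) :=
  let pairslist :=
    (PySem.List.pyRange 0 (PySem.List.len A) 1).foldl (fun acc i =>
      (PySem.List.pyRange 0 (PySem.List.len A) 1).foldl (fun acc j =>
        if i == j then acc
        else if is_odd_pair (PySem.List.pyGetD A i 0) (PySem.List.pyGetD A j 0) then
          acc ++ [(PySem.List.pyGetD A i 0, PySem.List.pyGetD A j 0)]
        else acc) acc) []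
  PySem.Set.ofList (pairslist.map pvFrozen2)

def has_unique_odd_sum_pairs (A : List Int) : Bool :=
  let pairs := find_odd_pairs A
  pairs.any (fun i =>
    let paircheck :=
      [i.1, i.2] ++ pairs.foldl (fun acc j =>
        if i.1 == j.1 || i.1 == j.2 || i.2 == j.1 || i.2 == j.2 then acc
        else acc ++ [j.1, j.2]) []
    PySem.Set.equal (PySem.Set.ofList paircheck) (PySem.Set.ofList A))

-- ===== PORT B =====
def has_unique_odd_sum_pairs_alt (A : List Int) : Bool :=
  let evens := PySem.Set.ofList (A.filter (fun x => PySem.Int.mod x 2 == 0))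
  let odds := PySem.Set.ofList (A.filter (fun x => !(PySem.Int.mod x 2 == 0)))
  let e := evens.length
  let o := odds.length
  (e == 1 && o == 1) || (decide (2 ≤ e) && decide (2 ≤ o))

-- ===== PRECONDITION & SPEC =====
def Spec_has_unique_odd_sum_pairs (A : List Int) (out : Bool) : Prop := out = has_unique_odd_sum_pairs_alt A
instance (A : List Int) (out : Bool) : Decidable (Spec_has_unique_odd_sum_pairs A out) := by unfold Spec_has_unique_odd_sum_pairs; infer_instance

-- ===== CLAIM (what is proved, stated in full; the proofs are below) =====
def Claim_equal_has_unique_odd_sum_pairs : Prop := ∀ (A : List Int), Dom_has_unique_odd_sum_pairs A → Spec_has_unique_odd_sum_pairs A (has_unique_odd_sum_pairs A)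

-- ===== LEMMAS AND PROOFS =====

-- ----- proof-only predicates: membership characterizations of both ports -----

def PvEvenIn (A : List Int) (x : Int) : Prop := x ∈ A ∧ x % 2 = 0
def PvOddIn (A : List Int) (x : Int) : Prop := x ∈ A ∧ x % 2 ≠ 0

-- a pair as A's deduped pair list holds it: both values in A, odd sum, normalized
def PvPair (A : List Int) (p : Int × Int) : Prop :=
  p.1 ∈ A ∧ p.2 ∈ A ∧ (p.1 + p.2) % 2 ≠ 0 ∧ p.1 < p.2

def PvShares (p q : Int × Int) : Prop :=
  p.1 = q.1 ∨ p.1 = q.2 ∨ p.2 = q.1 ∨ p.2 = q.2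

def PvCover (A : List Int) (p : Int × Int) : Prop :=
  ∀ x, (x = p.1 ∨ x = p.2 ∨ ∃ q, PvPair A q ∧ ¬ PvShares p q ∧ (x = q.1 ∨ x = q.2)) ↔ x ∈ A

theorem mem_pairslist (A : List Int) (a b : Int) :
    (a, b) ∈ (PySem.List.pyRange 0 (PySem.List.len A) 1).foldl (fun acc i =>
      (PySem.List.pyRange 0 (PySem.List.len A) 1).foldl (fun acc j =>
        if i == j then acc
        else if is_odd_pair (PySem.List.pyGetD A i 0) (PySem.List.pyGetD A j 0) then
          acc ++ [(PySem.List.pyGetD A i 0, PySem.List.pyGetD A j 0)]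
        else acc) acc) ([] : List (Int × Int)) ↔
    (a ∈ A ∧ b ∈ A ∧ (a + b) % 2 ≠ 0) := by
  set R := PySem.List.pyRange 0 (PySem.List.len A) 1 with hR
  have hg : ∀ (i : Int), (fun (acc : List (Int × Int)) (j : Int) =>
        if i == j then acc
        else if is_odd_pair (PySem.List.pyGetD A i 0) (PySem.List.pyGetD A j 0) then
          acc ++ [(PySem.List.pyGetD A i 0, PySem.List.pyGetD A j 0)]
        else acc)
      = (fun acc j => acc ++ (if i == j then []
        else if is_odd_pair (PySem.List.pyGetD A i 0) (PySem.List.pyGetD A j 0) then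
          [(PySem.List.pyGetD A i 0, PySem.List.pyGetD A j 0)] else [])) := by
    intro i; funext acc j
    split <;> [simp; split <;> simp]
  have hinner : ∀ (i : Int) (acc : List (Int × Int)),
      R.foldl (fun acc j =>
        if i == j then acc
        else if is_odd_pair (PySem.List.pyGetD A i 0) (PySem.List.pyGetD A j 0) then
          acc ++ [(PySem.List.pyGetD A i 0, PySem.List.pyGetD A j 0)]
        else acc) acc
      = acc ++ R.flatMap (fun j => if i == j then []
        else if is_odd_pair (PySem.List.pyGetD A i 0) (PySem.List.pyGetD A j 0) then
          [(PySem.List.pyGetD A i 0, PySem.List.pyGetD A j 0)] else []) := by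
    intro i acc
    rw [hg i, PySem.List.foldl_append_eq_flatMap]
  have houter : (fun (acc : List (Int × Int)) (i : Int) =>
      R.foldl (fun acc j =>
        if i == j then acc
        else if is_odd_pair (PySem.List.pyGetD A i 0) (PySem.List.pyGetD A j 0) then
          acc ++ [(PySem.List.pyGetD A i 0, PySem.List.pyGetD A j 0)]
        else acc) acc)
      = (fun acc i => acc ++ R.flatMap (fun j => if i == j then []
        else if is_odd_pair (PySem.List.pyGetD A i 0) (PySem.List.pyGetD A j 0) then
          [(PySem.List.pyGetD A i 0, PySem.List.pyGetD A j 0)] else [])) := by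
    funext acc i; exact hinner i acc
  rw [houter, PySem.List.foldl_append_eq_flatMap]
  simp only [List.nil_append, List.mem_flatMap]
  constructor
  · rintro ⟨i, hi, j, hj, hmem⟩
    rw [hR, PySem.List.mem_pyRange_one] at hi hj
    simp only [PySem.List.len_eq] at hi hj
    have hia : PySem.List.pyGetD A i 0 = A[i.toNat]'(by omega) :=
      PySem.List.pyGetD_eq_getElem A 0 (by omega) (by simpa using hi.2)
    have hjb : PySem.List.pyGetD A j 0 = A[j.toNat]'(by omega) :=
      PySem.List.pyGetD_eq_getElem A 0 (by omega) (by simpa using hj.2)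
    split at hmem
    · simp at hmem
    · split at hmem
      · rename_i hodd
        simp only [List.mem_singleton, Prod.mk.injEq] at hmem
        obtain ⟨ha, hb⟩ := hmem
        subst ha; subst hb
        refine ⟨by rw [hia]; exact List.getElem_mem _, by rw [hjb]; exact List.getElem_mem _, ?_⟩
        unfold is_odd_pair at hodd
        rw [PySem.Int.mod_eq_emod_of_pos (by norm_num)] at hodd
        split at hodd <;> simp_all
      · simp at hmem
  · rintro ⟨ha, hb, hodd⟩
    obtain ⟨ia, hia, hga⟩ := List.mem_iff_getElem.mp ha
    obtain ⟨ib, hib, hgb⟩ := List.mem_iff_getElem.mp hb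
    refine ⟨(ia : Int), ?_, (ib : Int), ?_, ?_⟩
    · rw [hR, PySem.List.mem_pyRange_one]; simp; omega
    · rw [hR, PySem.List.mem_pyRange_one]; simp; omega
    · have h1 : PySem.List.pyGetD A (ia : Int) 0 = a := by
        rw [PySem.List.pyGetD_eq_getElem A 0 (by omega) (by simpa using hia)]
        simpa using hga
      have h2 : PySem.List.pyGetD A (ib : Int) 0 = b := by
        rw [PySem.List.pyGetD_eq_getElem A 0 (by omega) (by simpa using hib)]
        simpa using hgb
      have hne : ((ia : Int) == (ib : Int)) = false := by
        simp only [beq_eq_false_iff_ne, ne_eq, Int.natCast_inj]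
        intro hEq
        rw [hEq] at h1
        rw [h1] at h2
        omega
      rw [hne]
      simp only [Bool.false_eq_true, if_false]
      have : is_odd_pair (PySem.List.pyGetD A (ia:Int) 0) (PySem.List.pyGetD A (ib:Int) 0) = true := by
        rw [h1, h2]
        unfold is_odd_pair
        rw [PySem.Int.mod_eq_emod_of_pos (by norm_num)]
        split <;> simp_all
      rw [this]
      simp [h1, h2]

theorem mem_find_odd_pairs (A : List Int) (p : Int × Int) :
    p ∈ find_odd_pairs A ↔ PvPair A p := by
  unfold find_odd_pairs
  rw [PySem.Set.mem_ofList, List.mem_map]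
  constructor
  · rintro ⟨⟨a, b⟩, hab, hfr⟩
    obtain ⟨ha, hb, hodd⟩ := (mem_pairslist A a b).mp hab
    have hne : a ≠ b := by intro h; subst h; omega
    unfold pvFrozen2 at hfr
    unfold PvPair
    split at hfr <;> subst hfr <;> simp_all <;> omega
  · rintro ⟨h1, h2, hodd, hlt⟩
    refine ⟨(p.1, p.2), (mem_pairslist A p.1 p.2).mpr ⟨h1, h2, hodd⟩, ?_⟩
    unfold pvFrozen2
    simp [le_of_lt hlt]
theorem lhs_iff (A : List Int) :
    has_unique_odd_sum_pairs A = true ↔ ∃ p, PvPair A p ∧ PvCover A p := by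
  unfold has_unique_odd_sum_pairs
  rw [List.any_eq_true]
  apply exists_congr
  intro p
  rw [and_congr (mem_find_odd_pairs A p) ?_]
  set pairs := find_odd_pairs A with hp
  have hfun : (fun (acc : List Int) (j : Int × Int) =>
      if p.1 == j.1 || p.1 == j.2 || p.2 == j.1 || p.2 == j.2 then acc
      else acc ++ [j.1, j.2])
      = fun acc j => acc ++ (if p.1 == j.1 || p.1 == j.2 || p.2 == j.1 || p.2 == j.2 then []
        else [j.1, j.2]) := by
    funext acc j; split <;> simp
  rw [hfun, PySem.List.foldl_append_eq_flatMap, PySem.Set.equal_iff]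
  unfold PvCover
  apply forall_congr'
  intro x
  rw [PySem.Set.mem_ofList, PySem.Set.mem_ofList]
  apply iff_congr ?_ Iff.rfl
  simp only [List.nil_append, List.mem_append, List.mem_cons, List.mem_flatMap, List.not_mem_nil, or_false, or_assoc]
  constructor
  · rintro (h | h | ⟨q, hq, hmem⟩)
    · exact Or.inl h
    · exact Or.inr (Or.inl h)
    · refine Or.inr (Or.inr ⟨q, (mem_find_odd_pairs A q).mp hq, ?_, ?_⟩)
      · intro hsh
        unfold PvShares at hsh
        split at hmem
        · simp at hmem
        · rename_i hcond
          simp only [Bool.or_eq_true, beq_iff_eq] at hcond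
          tauto
      · split at hmem
        · simp at hmem
        · simpa using hmem
  · rintro (h | h | ⟨q, hq, hnsh, hmem⟩)
    · exact Or.inl h
    · exact Or.inr (Or.inl h)
    · refine Or.inr (Or.inr ⟨q, (mem_find_odd_pairs A q).mpr hq, ?_⟩)
      have hcond : (p.1 == q.1 || p.1 == q.2 || p.2 == q.1 || p.2 == q.2) = false := by
        unfold PvShares at hnsh
        simp only [Bool.or_eq_false_iff, beq_eq_false_iff_ne, ne_eq]
        tauto
      rw [hcond]
      simpa using hmem

theorem nodup_two_le {l : List Int} (h : l.Nodup) :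
    2 ≤ l.length ↔ ∃ a ∈ l, ∃ b ∈ l, a ≠ b := by
  rw [← List.toFinset_card_of_nodup h]
  constructor
  · intro hc
    obtain ⟨a, ha, b, hb, hab⟩ := Finset.one_lt_card.mp (show 1 < l.toFinset.card by omega)
    exact ⟨a, by simpa using ha, b, by simpa using hb, hab⟩
  · rintro ⟨a, ha, b, hb, hab⟩
    have h1 : 1 < l.toFinset.card :=
      Finset.one_lt_card.mpr ⟨a, by simpa using ha, b, by simpa using hb, hab⟩
    omega

theorem nodup_len_one {l : List Int} (h : l.Nodup) :
    l.length = 1 ↔ ∃ u, ∀ x, x ∈ l ↔ x = u := by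
  constructor
  · intro h1
    obtain ⟨u, hu⟩ := List.length_eq_one_iff.mp h1
    exact ⟨u, by simp [hu]⟩
  · rintro ⟨u, hu⟩
    have hperm : l.Perm [u] :=
      (List.perm_ext_iff_of_nodup h (by simp)).mpr (by simpa using hu)
    simp [List.perm_singleton.mp hperm]

theorem rhs_iff (A : List Int) :
    has_unique_odd_sum_pairs_alt A = true ↔
      ((∃ u, PvEvenIn A u ∧ ∀ x, PvEvenIn A x → x = u) ∧
       (∃ v, PvOddIn A v ∧ ∀ x, PvOddIn A x → x = v)) ∨
      ((∃ u u', PvEvenIn A u ∧ PvEvenIn A u' ∧ u ≠ u') ∧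
       (∃ v v', PvOddIn A v ∧ PvOddIn A v' ∧ v ≠ v')) := by
  unfold has_unique_odd_sum_pairs_alt
  simp only [Bool.or_eq_true, Bool.and_eq_true, beq_iff_eq, decide_eq_true_eq]
  have he : ∀ x, x ∈ PySem.Set.ofList (A.filter (fun x => PySem.Int.mod x 2 == 0)) ↔ PvEvenIn A x := by
    intro x
    rw [PySem.Set.mem_ofList, List.mem_filter]
    unfold PvEvenIn
    rw [PySem.Int.mod_eq_emod_of_pos (by norm_num)]
    simp
  have ho : ∀ x, x ∈ PySem.Set.ofList (A.filter (fun x => !(PySem.Int.mod x 2 == 0))) ↔ PvOddIn A x := by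
    intro x
    rw [PySem.Set.mem_ofList, List.mem_filter]
    unfold PvOddIn
    rw [PySem.Int.mod_eq_emod_of_pos (by norm_num)]
    simp
  apply or_congr
  · apply and_congr
    · rw [nodup_len_one (PySem.Set.nodup_ofList _)]
      constructor
      · rintro ⟨u, hu⟩
        refine ⟨u, (he u).mp ((hu u).mpr rfl), fun x hx => (hu x).mp ((he x).mpr hx)⟩
      · rintro ⟨u, hUE, huniq⟩
        exact ⟨u, fun x => ⟨fun hx => huniq x ((he x).mp hx), fun hxu => (he x).mpr (hxu ▸ hUE)⟩⟩
    · rw [nodup_len_one (PySem.Set.nodup_ofList _)]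
      constructor
      · rintro ⟨v, hv⟩
        refine ⟨v, (ho v).mp ((hv v).mpr rfl), fun x hx => (hv x).mp ((ho x).mpr hx)⟩
      · rintro ⟨v, hVO, hvuniq⟩
        exact ⟨v, fun x => ⟨fun hx => hvuniq x ((ho x).mp hx), fun hxv => (ho x).mpr (hxv ▸ hVO)⟩⟩
  · apply and_congr
    · rw [nodup_two_le (PySem.Set.nodup_ofList _)]
      constructor
      · rintro ⟨a, ha, b, hb, hab⟩
        exact ⟨a, b, (he a).mp ha, (he b).mp hb, hab⟩
      · rintro ⟨a, b, ha, hb, hab⟩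
        exact ⟨a, (he a).mpr ha, b, (he b).mpr hb, hab⟩
    · rw [nodup_two_le (PySem.Set.nodup_ofList _)]
      constructor
      · rintro ⟨a, ha, b, hb, hab⟩
        exact ⟨a, b, (ho a).mp ha, (ho b).mp hb, hab⟩
      · rintro ⟨a, b, ha, hb, hab⟩
        exact ⟨a, (ho a).mpr ha, b, (ho b).mpr hb, hab⟩

theorem pair_oriented (A : List Int) {a b : Int} (ha : a ∈ A) (hb : b ∈ A)
    (hodd : (a + b) % 2 ≠ 0) :
    ∃ p, PvPair A p ∧ ((p.1 = a ∧ p.2 = b) ∨ (p.1 = b ∧ p.2 = a)) := by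
  rcases lt_or_gt_of_ne (show a ≠ b by omega) with h | h
  · exact ⟨(a, b), ⟨ha, hb, hodd, h⟩, Or.inl ⟨rfl, rfl⟩⟩
  · exact ⟨(b, a), ⟨hb, ha, by omega, h⟩, Or.inr ⟨rfl, rfl⟩⟩

theorem cover_aux (A : List Int) (p : Int × Int) {x w : Int} (hx : x ∈ A) (hw : w ∈ A)
    (hodd : (x + w) % 2 ≠ 0) (h1 : p.1 ≠ x) (h2 : p.1 ≠ w) (h3 : p.2 ≠ x) (h4 : p.2 ≠ w) :
    ∃ q, PvPair A q ∧ ¬ PvShares p q ∧ (x = q.1 ∨ x = q.2) := by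
  obtain ⟨q, hq, hor⟩ := pair_oriented A hx hw hodd
  refine ⟨q, hq, ?_, ?_⟩
  · unfold PvShares
    rcases hor with ⟨e1, e2⟩ | ⟨e1, e2⟩ <;> rw [e1, e2] <;> tauto
  · rcases hor with ⟨e1, _⟩ | ⟨_, e2⟩
    · exact Or.inl e1.symm
    · exact Or.inr e2.symm

theorem forward_aux (A : List Int) (p : Int × Int) (hcov : PvCover A p) {u v : Int}
    (hu : u ∈ A) (hv : v ∈ A) (hue : u % 2 = 0) (hvo : v % 2 ≠ 0)
    (hset : (p.1 = u ∧ p.2 = v) ∨ (p.1 = v ∧ p.2 = u)) :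
    ((∃ u, PvEvenIn A u ∧ ∀ x, PvEvenIn A x → x = u) ∧
     (∃ v, PvOddIn A v ∧ ∀ x, PvOddIn A x → x = v)) ∨
    ((∃ u u', PvEvenIn A u ∧ PvEvenIn A u' ∧ u ≠ u') ∧
     (∃ v v', PvOddIn A v ∧ PvOddIn A v' ∧ v ≠ v')) := by
  by_cases he : ∃ u', PvEvenIn A u' ∧ u' ≠ u
  · by_cases ho : ∃ v', PvOddIn A v' ∧ v' ≠ v
    · obtain ⟨u', hu'E, hneu⟩ := he
      obtain ⟨v', hv'O, hnev⟩ := ho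
      exact Or.inr ⟨⟨u, u', ⟨hu, hue⟩, hu'E, fun h => hneu (h ▸ rfl)⟩,
                    ⟨v, v', ⟨hv, hvo⟩, hv'O, fun h => hnev (h ▸ rfl)⟩⟩
    · -- extra even u', odd unique: contradiction
      exfalso
      push Not at ho
      obtain ⟨u', ⟨hu'A, hu'e⟩, hneu⟩ := he
      rcases (hcov u').mpr hu'A with h | h | ⟨q, ⟨hq1, hq2, hqodd, _⟩, hnsh, _⟩
      · rcases hset with ⟨e1, _⟩ | ⟨e1, _⟩ <;> omega
      · rcases hset with ⟨_, e2⟩ | ⟨_, e2⟩ <;> omega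
      · unfold PvShares at hnsh
        push Not at hnsh
        obtain ⟨n1, n2, n3, n4⟩ := hnsh
        rcases (show q.1 % 2 ≠ 0 ∨ q.2 % 2 ≠ 0 by omega) with hqo | hqo
        · have := ho q.1 ⟨hq1, hqo⟩
          rcases hset with ⟨e1, e2⟩ | ⟨e1, e2⟩ <;> omega
        · have := ho q.2 ⟨hq2, hqo⟩
          rcases hset with ⟨e1, e2⟩ | ⟨e1, e2⟩ <;> omega
  · by_cases ho : ∃ v', PvOddIn A v' ∧ v' ≠ v
    · -- extra odd v', even unique: contradiction
      exfalso
      push Not at he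
      obtain ⟨v', ⟨hv'A, hv'o⟩, hnev⟩ := ho
      rcases (hcov v').mpr hv'A with h | h | ⟨q, ⟨hq1, hq2, hqodd, _⟩, hnsh, _⟩
      · rcases hset with ⟨e1, _⟩ | ⟨e1, _⟩ <;> omega
      · rcases hset with ⟨_, e2⟩ | ⟨_, e2⟩ <;> omega
      · unfold PvShares at hnsh
        push Not at hnsh
        obtain ⟨n1, n2, n3, n4⟩ := hnsh
        rcases (show q.1 % 2 = 0 ∨ q.2 % 2 = 0 by omega) with hqe | hqe
        · have := he q.1 ⟨hq1, hqe⟩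
          rcases hset with ⟨e1, e2⟩ | ⟨e1, e2⟩ <;> omega
        · have := he q.2 ⟨hq2, hqe⟩
          rcases hset with ⟨e1, e2⟩ | ⟨e1, e2⟩ <;> omega
    · -- both unique
      push Not at he ho
      exact Or.inl ⟨⟨u, ⟨hu, hue⟩, fun x hx => he x hx⟩, ⟨v, ⟨hv, hvo⟩, fun x hx => ho x hx⟩⟩

theorem key_iff (A : List Int) :
    (∃ p, PvPair A p ∧ PvCover A p) ↔
      ((∃ u, PvEvenIn A u ∧ ∀ x, PvEvenIn A x → x = u) ∧
       (∃ v, PvOddIn A v ∧ ∀ x, PvOddIn A x → x = v)) ∨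
      ((∃ u u', PvEvenIn A u ∧ PvEvenIn A u' ∧ u ≠ u') ∧
       (∃ v v', PvOddIn A v ∧ PvOddIn A v' ∧ v ≠ v')) := by
  constructor
  · rintro ⟨p, ⟨hp1, hp2, hodd, _⟩, hcov⟩
    rcases (show (p.1 % 2 = 0 ∧ p.2 % 2 ≠ 0) ∨ (p.1 % 2 ≠ 0 ∧ p.2 % 2 = 0) by omega) with
      ⟨h1, h2⟩ | ⟨h1, h2⟩
    · exact forward_aux A p hcov hp1 hp2 h1 h2 (Or.inl ⟨rfl, rfl⟩)
    · exact forward_aux A p hcov hp2 hp1 h2 h1 (Or.inr ⟨rfl, rfl⟩)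
  · rintro (⟨⟨u, ⟨huA, hue⟩, huniq⟩, ⟨v, ⟨hvA, hvo⟩, hvuniq⟩⟩ |
            ⟨⟨u, u', ⟨huA, hue⟩, ⟨hu'A, hu'e⟩, hneu⟩, ⟨v, v', ⟨hvA, hvo⟩, ⟨hv'A, hv'o⟩, hnev⟩⟩)
    · obtain ⟨p, hp, hor⟩ := pair_oriented A huA hvA (by omega)
      refine ⟨p, hp, fun x => ⟨?_, ?_⟩⟩
      · rintro (h | h | ⟨q, hq, _, (h | h)⟩)
        · rcases hor with ⟨e1, _⟩ | ⟨e1, _⟩ <;> rw [h, e1] <;> [exact huA; exact hvA]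
        · rcases hor with ⟨_, e2⟩ | ⟨_, e2⟩ <;> rw [h, e2] <;> [exact hvA; exact huA]
        · exact h ▸ hq.1
        · exact h ▸ hq.2.1
      · intro hxA
        by_cases hxe : x % 2 = 0
        · have hx := huniq x ⟨hxA, hxe⟩
          rcases hor with ⟨e1, _⟩ | ⟨_, e2⟩
          · exact Or.inl (by omega)
          · exact Or.inr (Or.inl (by omega))
        · have hx := hvuniq x ⟨hxA, hxe⟩
          rcases hor with ⟨_, e2⟩ | ⟨e1, _⟩
          · exact Or.inr (Or.inl (by omega))
          · exact Or.inl (by omega)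
    · obtain ⟨p, hp, hor⟩ := pair_oriented A huA hvA (by omega)
      refine ⟨p, hp, fun x => ⟨?_, ?_⟩⟩
      · rintro (h | h | ⟨q, hq, _, (h | h)⟩)
        · rcases hor with ⟨e1, _⟩ | ⟨e1, _⟩ <;> rw [h, e1] <;> [exact huA; exact hvA]
        · rcases hor with ⟨_, e2⟩ | ⟨_, e2⟩ <;> rw [h, e2] <;> [exact hvA; exact huA]
        · exact h ▸ hq.1
        · exact h ▸ hq.2.1
      · intro hxA
        by_cases hx1 : x = p.1
        · exact Or.inl hx1
        by_cases hx2 : x = p.2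
        · exact Or.inr (Or.inl hx2)
        refine Or.inr (Or.inr ?_)
        by_cases hxe : x % 2 = 0
        · refine cover_aux A p hxA hv'A (by omega) ?_ ?_ ?_ ?_ <;>
            rcases hor with ⟨e1, e2⟩ | ⟨e1, e2⟩ <;> omega
        · refine cover_aux A p hxA hu'A (by omega) ?_ ?_ ?_ ?_ <;>
            rcases hor with ⟨e1, e2⟩ | ⟨e1, e2⟩ <;> omega

-- ===== VERDICT (by name: the statement is the Claim_ definition above) =====
theorem has_unique_odd_sum_pairs_spec : Claim_equal_has_unique_odd_sum_pairs := by
  intro A _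
  unfold Spec_has_unique_odd_sum_pairs
  apply Bool.eq_iff_iff.mpr
  rw [lhs_iff, rhs_iff, key_iff]
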